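-- pv_equiv track=rewrite | github.com/kids-first/arranger | update_modules_versions.py | update_given_package_node
-- ===== SOURCE A (Python) =====
-- def update_given_package_node(node_ref, names_versions):
--     for dependency_name, dependency_version in node_ref.items():
--         if dependency_name.startswith('@kfarranger/'):
--             matched_name_version = list(
--                 filter(lambda name_version: name_version['name'] == dependency_name, names_versions))
--             if matched_name_version:
--                 up_to_date_name_version = matched_name_version[0]
--                 up_to_date_version = up_to_date_name_version['version']
--                 node_ref[dependency_name] = up_to_date_version
--     return node_ref
-- ===== SOURCE B (Python) =====
-- def update_given_package_node(node_ref, names_versions):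
--     first_version = {}
--     for nv in names_versions:
--         if 'name' in nv and 'version' in nv and nv['name'] not in first_version:
--             first_version[nv['name']] = nv['version']
--     for name, version in first_version.items():
--         if name.startswith('@kfarranger/') and name in node_ref:
--             node_ref[name] = version
--     return node_ref
-- ===== Notes on version B (the rewrite author's own statement) =====
-- stated objective: alternative
-- what changed: B traverses names_versions once to build a first-occurrence name->version dict and then assigns each recorded @kfarranger/ name present in node_ref, instead of A's loop over node_ref that re-filters the whole names_versions list for every @kfarranger/ key.
-- outside the precondition, e.g. on update_given_package_node({'@kfarranger/a': '1'}, [{'version': '2'}]): A raises KeyError, B returns {'@kfarranger/a': '1'}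
import Mathlib
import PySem

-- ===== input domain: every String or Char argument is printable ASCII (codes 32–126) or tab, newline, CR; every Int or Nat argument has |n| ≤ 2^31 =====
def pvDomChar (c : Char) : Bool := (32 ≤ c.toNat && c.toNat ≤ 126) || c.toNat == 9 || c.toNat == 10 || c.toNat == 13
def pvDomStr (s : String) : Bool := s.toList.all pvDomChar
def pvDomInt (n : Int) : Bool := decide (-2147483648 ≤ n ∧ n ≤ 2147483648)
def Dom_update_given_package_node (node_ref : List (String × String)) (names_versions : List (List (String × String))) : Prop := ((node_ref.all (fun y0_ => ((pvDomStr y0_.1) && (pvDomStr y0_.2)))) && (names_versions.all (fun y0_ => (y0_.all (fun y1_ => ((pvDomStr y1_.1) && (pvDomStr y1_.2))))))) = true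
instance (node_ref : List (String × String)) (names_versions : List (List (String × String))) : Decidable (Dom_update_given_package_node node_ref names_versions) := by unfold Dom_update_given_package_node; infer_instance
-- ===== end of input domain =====

-- B rewrites A by a different decomposition: one pass over names_versions builds a
-- first-occurrence name→version map, then one pass over that map assigns into node_ref;
-- A's per-key filter scan over names_versions disappears. Equivalence is about the
-- returned dict (A and B both also mutate node_ref in place in Python, identically).


-- ===== PORT A =====
-- for (name, _) in node_ref.items(): if name.startswith('@kfarranger/'):
--   matched = list(filter(lambda nv: nv['name'] == name, names_versions));
--   if matched: node_ref[name] = matched[0]['version']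
-- nv['name'] / matched[0]['version'] raise KeyError when the key is absent: the port
-- keeps the dict unchanged there; exactly those inputs are excluded by Pre_ below.
def update_given_package_node (node_ref : List (String × String)) (names_versions : List (List (String × String))) : List (String × String) :=
  let d0 : PySem.Dict String String := PySem.Dict.mk node_ref
  (d0.keys.foldl (fun d k =>
      if PySem.Str.startswith k "@kfarranger/" then
        match names_versions.filter (fun nv => (PySem.Dict.mk nv).get? "name" == some k) with
        | [] => d
        | m :: _ =>
          match (PySem.Dict.mk m).get? "version" with
          | some v => d.insert k v
          | none => d          -- Python raises KeyError: outside Pre_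
      else d) d0).items

-- ===== PORT B =====
-- first_version = {}; for nv in names_versions:
--   if 'name' in nv and 'version' in nv and nv['name'] not in first_version: first_version[nv['name']] = nv['version']
-- for name, version in first_version.items():
--   if name.startswith('@kfarranger/') and name in node_ref: node_ref[name] = version
def update_given_package_node_alt (node_ref : List (String × String)) (names_versions : List (List (String × String))) : List (String × String) :=
  let first : PySem.Dict String String := names_versions.foldl (fun fv nv =>
      match (PySem.Dict.mk nv).get? "name", (PySem.Dict.mk nv).get? "version" with
      | some n, some v => if fv.contains n then fv else fv.insert n v
      | _, _ => fv) PySem.Dict.empty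
  (first.items.foldl (fun d kv =>
      if PySem.Str.startswith kv.1 "@kfarranger/" && d.contains kv.1 then
        d.insert kv.1 kv.2
      else d) (PySem.Dict.mk node_ref)).items

-- ===== PRECONDITION & SPEC =====
-- Pre_ excludes (a) assoc lists with duplicate keys (outer dict or inner dicts), which
-- represent no Python dict value, and (b) exactly the inputs where Python A raises
-- KeyError: some nv lacking 'name' while node_ref has a '@kfarranger/' key, or the
-- first nv matching such a key lacking 'version'.
def Pre_update_given_package_node (node_ref : List (String × String)) (names_versions : List (List (String × String))) : Prop :=
  (node_ref.map Prod.fst).Nodup ∧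
  (∀ nv ∈ names_versions, (nv.map Prod.fst).Nodup) ∧
  ((∃ k ∈ node_ref.map Prod.fst, PySem.Str.startswith k "@kfarranger/" = true) →
      ∀ nv ∈ names_versions, ((PySem.Dict.mk nv).get? "name").isSome = true) ∧
  (∀ k ∈ node_ref.map Prod.fst, PySem.Str.startswith k "@kfarranger/" = true →
      (names_versions.find? (fun nv => (PySem.Dict.mk nv).get? "name" == some k)).all
        (fun m => ((PySem.Dict.mk m).get? "version").isSome) = true)
instance (node_ref : List (String × String)) (names_versions : List (List (String × String))) : Decidable (Pre_update_given_package_node node_ref names_versions) := by unfold Pre_update_given_package_node; infer_instance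

def pvWitness_update_given_package_node : (List (String × String)) × (List (List (String × String))) :=
  ([("@kfarranger/admin", "1.0.0"), ("react", "16.8.0")],
   [[("name", "@kfarranger/admin"), ("version", "2.5.0")], [("name", "react"), ("version", "17.0.0")]])

def Spec_update_given_package_node (node_ref : List (String × String)) (names_versions : List (List (String × String))) (out : List (String × String)) : Prop := out = update_given_package_node_alt node_ref names_versions
instance (node_ref : List (String × String)) (names_versions : List (List (String × String))) (out : List (String × String)) : Decidable (Spec_update_given_package_node node_ref names_versions out) := by unfold Spec_update_given_package_node; infer_instance

-- ===== CLAIM (what is proved, stated in full; the proofs are below) =====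
def Claim_equal_update_given_package_node : Prop := ∀ (node_ref : List (String × String)) (names_versions : List (List (String × String))), Dom_update_given_package_node node_ref names_versions → Pre_update_given_package_node node_ref names_versions → Spec_update_given_package_node node_ref names_versions (update_given_package_node node_ref names_versions)

-- ===== LEMMAS AND PROOFS =====

-- abbreviations used only by the proofs
def pvPfx (k : String) : Bool := PySem.Str.startswith k "@kfarranger/"
def pvNameMatch (k : String) (nv : List (String × String)) : Bool := (PySem.Dict.mk nv).get? "name" == some k
def pvVer (nv : List (String × String)) : Option String := (PySem.Dict.mk nv).get? "version"
-- A's value for key k: version of the first name-match (if it has one), else the old value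
def pvGOpt (nvs : List (List (String × String))) (k : String) : Option String :=
  (nvs.find? (pvNameMatch k)).bind pvVer
def pvGA (nvs : List (List (String × String))) (k v : String) : String :=
  if pvPfx k then (pvGOpt nvs k).getD v else v
-- B's first_version entry for k: version of the first name-match that also carries "version"
def pvElig (k : String) (nv : List (String × String)) : Bool :=
  pvNameMatch k nv && (pvVer nv).isSome
def pvFOpt (nvs : List (List (String × String))) (k : String) : Option String :=
  (nvs.find? (pvElig k)).bind pvVer
-- the effect of B's second loop on one entry of node_ref
def pvFB (l : List (String × String)) (p : String × String) : String × String :=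
  match l.find? (fun kv => kv.1 == p.1) with
  | some kv => if pvPfx p.1 then (p.1, kv.2) else p
  | none => p

theorem pv_get?_eq_find? (l : List (String × String)) (x : String) :
    (PySem.Dict.mk l).get? x = (l.find? (fun kv => kv.1 == x)).map Prod.snd := by
  induction l with
  | nil => rfl
  | cons kv rest ih =>
    obtain ⟨k, v⟩ := kv
    rw [PySem.Dict.get?_mk_cons]
    by_cases h : (k == x) = true
    · simp [List.find?, h]
    · simp only [List.find?]
      rw [if_neg h]
      simp only [Bool.not_eq_true] at h
      rw [h]
      exact ih

-- B's first loop keeps keys unique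
theorem pv_first_nodup (nvs : List (List (String × String))) (fv : PySem.Dict String String)
    (h : fv.keys.Nodup) :
    (nvs.foldl (fun fv nv =>
        match (PySem.Dict.mk nv).get? "name", (PySem.Dict.mk nv).get? "version" with
        | some n, some v => if fv.contains n then fv else fv.insert n v
        | _, _ => fv) fv).keys.Nodup := by
  induction nvs generalizing fv with
  | nil => exact h
  | cons nv rest ih =>
    simp only [List.foldl_cons]
    cases (PySem.Dict.mk nv).get? "name" with
    | none => exact ih fv h
    | some n =>
      cases (PySem.Dict.mk nv).get? "version" with
      | none => exact ih fv h
      | some v =>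
        dsimp only
        by_cases hc : fv.contains n = true
        · rw [if_pos hc]; exact ih fv h
        · rw [if_neg hc]; exact ih _ (PySem.Dict.nodup_keys_insert fv n v h)

-- under Pre_'s version clause, B's first eligible entry is A's first name-match
theorem pv_fOpt_eq_gOpt (nvs : List (List (String × String))) (x : String)
    (hver : ∀ m, nvs.find? (pvNameMatch x) = some m → (pvVer m).isSome = true) :
    pvFOpt nvs x = pvGOpt nvs x := by
  induction nvs with
  | nil => rfl
  | cons nv rest ih =>
    by_cases hm : pvNameMatch x nv = true
    · have hfind : (nv :: rest).find? (pvNameMatch x) = some nv := by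
        simp [List.find?, hm]
      have hsome := hver nv hfind
      have he : pvElig x nv = true := by simp [pvElig, hm, hsome]
      simp [pvFOpt, pvGOpt, List.find?, hm, he]
    · have hm' : pvNameMatch x nv = false := by simpa using hm
      have he : pvElig x nv = false := by simp [pvElig, hm']
      have h1 : pvFOpt (nv :: rest) x = pvFOpt rest x := by
        simp [pvFOpt, List.find?, he]
      have h2 : pvGOpt (nv :: rest) x = pvGOpt rest x := by
        simp [pvGOpt, List.find?, hm']
      rw [h1, h2]
      exact ih (fun m hm2 => hver m (by simp [List.find?, hm', hm2]))

theorem pv_stepA_eq (nvs : List (List (String × String))) (d : PySem.Dict String String) (k : String) :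
    (if PySem.Str.startswith k "@kfarranger/" then
       match nvs.filter (fun nv => (PySem.Dict.mk nv).get? "name" == some k) with
       | [] => d
       | m :: _ =>
         match (PySem.Dict.mk m).get? "version" with
         | some v => d.insert k v
         | none => d
     else d)
    = (match (if pvPfx k then pvGOpt nvs k else none) with
       | some w => d.insert k w
       | none => d) := by
  unfold pvPfx pvGOpt pvNameMatch pvVer
  by_cases h : PySem.Str.startswith k "@kfarranger/" = true
  · rw [if_pos h, if_pos h]
    have hf : nvs.find? (fun nv => (PySem.Dict.mk nv).get? "name" == some k)
        = (nvs.filter (fun nv => (PySem.Dict.mk nv).get? "name" == some k)).head? :=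
      (List.head?_filter).symm
    cases hfil : nvs.filter (fun nv => (PySem.Dict.mk nv).get? "name" == some k) with
    | nil => rw [hfil] at hf; rw [hf]; rfl
    | cons m t =>
      rw [hfil] at hf; rw [hf]
      cases (PySem.Dict.mk m).get? "version" <;> rfl
  · rw [if_neg h, if_neg h]

theorem pv_first_get? (nvs : List (List (String × String))) (fv : PySem.Dict String String) (y : String) :
    (nvs.foldl (fun fv nv =>
        match (PySem.Dict.mk nv).get? "name", (PySem.Dict.mk nv).get? "version" with
        | some n, some v => if fv.contains n then fv else fv.insert n v
        | _, _ => fv) fv).get? y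
      = (fv.get? y).or (pvFOpt nvs y) := by
  induction nvs generalizing fv with
  | nil => simp [pvFOpt]
  | cons nv rest ih =>
    simp only [List.foldl_cons]
    have hconsT : pvElig y nv = true → pvFOpt (nv :: rest) y = pvVer nv := by
      intro hb; simp [pvFOpt, List.find?, hb]
    have hconsF : pvElig y nv = false → pvFOpt (nv :: rest) y = pvFOpt rest y := by
      intro hb; simp [pvFOpt, List.find?, hb]
    cases hn : (PySem.Dict.mk nv).get? "name" with
    | none =>
      have he : pvElig y nv = false := by simp [pvElig, pvNameMatch, hn]
      have hstep : (match (none : Option String), (PySem.Dict.mk nv).get? "version" with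
          | some n, some v => if fv.contains n then fv else fv.insert n v
          | _, _ => fv) = fv := by
        cases (PySem.Dict.mk nv).get? "version" <;> rfl
      rw [hstep, ih, hconsF he]
    | some n =>
      cases hv : (PySem.Dict.mk nv).get? "version" with
      | none =>
        have he : pvElig y nv = false := by simp [pvElig, pvVer, hv]
        rw [ih, hconsF he]
      | some v =>
        dsimp only
        by_cases hy : n = y
        · subst hy
          have he : pvElig n nv = true := by
            simp [pvElig, pvNameMatch, pvVer, hn, hv]
          rw [hconsT he, pvVer, hv]
          by_cases hc : fv.contains n = true
          · rw [if_pos hc, ih]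
            have : (fv.get? n).isSome = true := by
              rw [← PySem.Dict.contains_eq_isSome_get?]; exact hc
            obtain ⟨a, ha⟩ := Option.isSome_iff_exists.mp this
            rw [ha]; rfl
          · rw [if_neg hc, ih]
            have hnone : fv.get? n = none := by
              rw [PySem.Dict.get?_eq_none_iff_contains]
              simpa using hc
            rw [hnone, PySem.Dict.get?_insert]
            simp
        · have he : pvElig y nv = false := by
            simp [pvElig, pvNameMatch, hn, hy]
          rw [hconsF he]
          by_cases hc : fv.contains n = true
          · rw [if_pos hc, ih]
          · rw [if_neg hc, ih, PySem.Dict.get?_insert]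
            rw [if_neg (fun hh => hy hh.symm)]

theorem pv_A_items (nvs : List (List (String × String))) :
    ∀ (ks : List String) (d : PySem.Dict String String), ks.Nodup →
      (∀ k ∈ ks, d.contains k = true) →
      (ks.foldl (fun d k =>
          match (if pvPfx k then pvGOpt nvs k else none) with
          | some w => d.insert k w
          | none => d) d).items
        = d.items.map (fun p => if p.1 ∈ ks then (p.1, pvGA nvs p.1 p.2) else p) := by
  intro ks
  induction ks with
  | nil => intro d _ _; simp
  | cons k ks ih =>
    intro d hnd hc
    have hk : d.contains k = true := hc k (by simp)
    have hknotin : k ∉ ks := (List.nodup_cons.mp hnd).1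
    simp only [List.foldl_cons]
    cases hg : (if pvPfx k then pvGOpt nvs k else none) with
    | none =>
      rw [ih d (List.nodup_cons.mp hnd).2 (fun k' hk' => hc k' (List.mem_cons_of_mem k hk'))]
      apply List.map_congr_left
      rintro ⟨p1, p2⟩ _
      by_cases hp : p1 = k
      · subst hp
        have hga : pvGA nvs p1 p2 = p2 := by
          unfold pvGA
          by_cases hpfx : pvPfx p1 = true
          · rw [if_pos hpfx]
            rw [if_pos hpfx] at hg
            rw [hg]
            rfl
          · rw [if_neg hpfx]
        simp [hknotin, hga]
      · simp [List.mem_cons, hp]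
    | some w =>
      have hpfx : pvPfx k = true := by
        by_contra hpf
        rw [if_neg hpf] at hg
        exact absurd hg (by simp)
      rw [if_pos hpfx] at hg
      rw [ih (d.insert k w) (List.nodup_cons.mp hnd).2
          (fun k' hk' => by
            rw [PySem.Dict.contains_insert, hc k' (List.mem_cons_of_mem k hk')]
            simp)]
      rw [PySem.Dict.items_insert_of_contains d w hk, List.map_map]
      apply List.map_congr_left
      rintro ⟨p1, p2⟩ _
      simp only [Function.comp]
      by_cases hp : p1 = k
      · subst hp
        have hga : pvGA nvs p1 p2 = w := by
          unfold pvGA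
          rw [if_pos hpfx, hg]
          rfl
        simp [hknotin, hga]
      · simp [List.mem_cons, hp]

theorem pv_B_items :
    ∀ (l : List (String × String)) (d : PySem.Dict String String), (l.map Prod.fst).Nodup →
      (l.foldl (fun d kv =>
          if PySem.Str.startswith kv.1 "@kfarranger/" && d.contains kv.1 then
            d.insert kv.1 kv.2
          else d) d).items
        = d.items.map (pvFB l) := by
  intro l
  induction l with
  | nil =>
    intro d _
    have : pvFB [] = id := by funext p; rfl
    simp [this]
  | cons hd l ih =>
    intro d hnd
    obtain ⟨n, w⟩ := hd
    have hnotin : n ∉ l.map Prod.fst := by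
      simpa using (List.nodup_cons.mp hnd).1
    simp only [List.foldl_cons]
    by_cases hc : (PySem.Str.startswith n "@kfarranger/" && d.contains n) = true
    · obtain ⟨hpfx0, hcontains⟩ : PySem.Str.startswith n "@kfarranger/" = true ∧ d.contains n = true := by
        simpa using hc
      have hpfx : pvPfx n = true := hpfx0
      rw [if_pos hc]
      rw [ih (d.insert n w) (List.nodup_cons.mp hnd).2]
      rw [PySem.Dict.items_insert_of_contains d w hcontains, List.map_map]
      apply List.map_congr_left
      rintro ⟨p1, p2⟩ _
      simp only [Function.comp]
      by_cases hp : p1 = n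
      · subst hp
        have hψ : (if ((p1, p2).1 == p1) = true then (p1, w) else (p1, p2)) = (p1, w) :=
          if_pos (by simp)
        rw [hψ]
        unfold pvFB
        have hfnone : l.find? (fun kv => kv.1 == (p1, w).1) = none := by
          rw [List.find?_eq_none]
          intro kv hkv h
          exact hnotin ((show kv.1 = p1 by simpa using h) ▸ List.mem_map_of_mem hkv)
        have hfcons : ((p1, w) :: l).find? (fun kv => kv.1 == (p1, p2).1) = some (p1, w) :=
          List.find?_cons_of_pos (h := by simp)
        rw [hfnone, hfcons]
        dsimp only
        rw [if_pos hpfx]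
      · have hψ : (if ((p1, p2).1 == n) = true then (n, w) else (p1, p2)) = (p1, p2) :=
          if_neg (by simp [hp])
        rw [hψ]
        unfold pvFB
        rw [show (((n, w) :: l).find? (fun kv => kv.1 == (p1, p2).1))
              = l.find? (fun kv => kv.1 == (p1, p2).1) from
            List.find?_cons_of_neg (h := by simp [Ne.symm hp])]
    · rw [if_neg hc]
      rw [ih d (List.nodup_cons.mp hnd).2]
      apply List.map_congr_left
      rintro ⟨p1, p2⟩ hp
      by_cases hpn : p1 = n
      · subst hpn
        have hcontains : d.contains p1 = true := by
          rw [PySem.Dict.contains_iff_mem_keys]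
          exact PySem.Dict.mem_keys_of_mem_items d hp
        have hpfx : pvPfx p1 = false := by
          cases hb : pvPfx p1
          · rfl
          · exact absurd (by rw [pvPfx] at hb; rw [hb, hcontains]; rfl) hc
        unfold pvFB
        have hfcons : ((p1, w) :: l).find? (fun kv => kv.1 == (p1, p2).1) = some (p1, w) :=
          List.find?_cons_of_pos (h := by simp)
        rw [hfcons]
        dsimp only
        cases l.find? (fun kv => kv.1 == p1) <;> simp [hpfx]
      · unfold pvFB
        rw [show (((n, w) :: l).find? (fun kv => kv.1 == (p1, p2).1))
              = l.find? (fun kv => kv.1 == (p1, p2).1) from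
            List.find?_cons_of_neg (h := by simp [Ne.symm hpn])]

-- ===== VERDICT (by name: the statement is the Claim_ definition above) =====
theorem update_given_package_node_spec : Claim_equal_update_given_package_node := by
  intro node_ref nvs _ hpre
  obtain ⟨hnd, _, _, h4⟩ := hpre
  unfold Spec_update_given_package_node
  unfold update_given_package_node update_given_package_node_alt
  -- A side: rewrite the loop body, then apply the canonical form of the key loop
  have hfun : (fun (d : PySem.Dict String String) (k : String) =>
      if PySem.Str.startswith k "@kfarranger/" then
        match nvs.filter (fun nv => (PySem.Dict.mk nv).get? "name" == some k) with
        | [] => d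
        | m :: _ =>
          match (PySem.Dict.mk m).get? "version" with
          | some v => d.insert k v
          | none => d
      else d)
      = (fun (d : PySem.Dict String String) (k : String) =>
        match (if pvPfx k then pvGOpt nvs k else none) with
        | some w => d.insert k w
        | none => d) := by
    funext d k; exact pv_stepA_eq nvs d k
  rw [hfun]
  have hkeys : (PySem.Dict.mk node_ref).keys = node_ref.map Prod.fst := PySem.Dict.keys_mk node_ref
  rw [pv_A_items nvs (PySem.Dict.mk node_ref).keys (PySem.Dict.mk node_ref)
      (by rw [hkeys]; exact hnd)
      (fun k hk => (PySem.Dict.contains_iff_mem_keys _ k).mpr hk)]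
  -- B side: canonical form of the assignment loop
  set first : PySem.Dict String String := nvs.foldl (fun fv nv =>
      match (PySem.Dict.mk nv).get? "name", (PySem.Dict.mk nv).get? "version" with
      | some n, some v => if fv.contains n then fv else fv.insert n v
      | _, _ => fv) PySem.Dict.empty with hfirst
  have hfstnodup : (first.items.map Prod.fst).Nodup := by
    have h0 := pv_first_nodup nvs PySem.Dict.empty PySem.Dict.nodup_keys_empty
    rw [← hfirst] at h0
    exact h0
  rw [pv_B_items first.items (PySem.Dict.mk node_ref) hfstnodup]
  rw [hkeys]
  apply List.map_congr_left
  intro p hp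
  have hpkeys : p.1 ∈ node_ref.map Prod.fst := by
    have := PySem.Dict.mem_keys_of_mem_items (PySem.Dict.mk node_ref) hp
    rwa [hkeys] at this
  rw [if_pos hpkeys]
  have hget : first.get? p.1 = pvFOpt nvs p.1 := by
    rw [hfirst, pv_first_get? nvs PySem.Dict.empty p.1, PySem.Dict.get?_empty]
    rfl
  have hfind : (first.items.find? (fun kv => kv.1 == p.1)).map Prod.snd = pvFOpt nvs p.1 := by
    rw [← hget]
    exact (pv_get?_eq_find? first.items p.1).symm
  by_cases hpfx : pvPfx p.1 = true
  · -- a @kfarranger/ key: Pre_'s version clause bridges the two first-match notions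
    have hver : ∀ m, nvs.find? (pvNameMatch p.1) = some m → (pvVer m).isSome = true := by
      intro m hm
      have h4' := h4 p.1 hpkeys (by rw [pvPfx] at hpfx; exact hpfx)
      rw [show nvs.find? (fun nv => (PySem.Dict.mk nv).get? "name" == some p.1)
            = nvs.find? (pvNameMatch p.1) from rfl, hm] at h4'
      simpa using h4'
    have hFG : pvFOpt nvs p.1 = pvGOpt nvs p.1 := pv_fOpt_eq_gOpt nvs p.1 hver
    unfold pvFB
    cases ho : first.items.find? (fun kv => kv.1 == p.1) with
    | none =>
      have hx : pvGOpt nvs p.1 = none := by rw [← hFG, ← hfind, ho]; rfl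
      unfold pvGA
      rw [if_pos hpfx, hx]
      exact Prod.mk.eta
    | some kv =>
      have hx : pvGOpt nvs p.1 = some kv.2 := by rw [← hFG, ← hfind, ho]; rfl
      unfold pvGA
      rw [if_pos hpfx, hx]
      simp [hpfx]
  · -- not a @kfarranger/ key: both sides keep the entry
    have hpfx' : pvPfx p.1 = false := by simpa using hpfx
    unfold pvGA pvFB
    rw [if_neg (show ¬ pvPfx p.1 = true by simp [hpfx'])]
    cases first.items.find? (fun kv => kv.1 == p.1) with
    | none => exact Prod.mk.eta
    | some kv => simp [hpfx']
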